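-- pv_equiv track=rewrite | github.com/Shuheng-Li/Relational-Inference | coequipment/Data.py | gen_colocation_triplet
-- ===== SOURCE A (Python) =====
-- def gen_colocation_triplet(train_x, train_y, prevent_same_type = False):
--     triplet = []
--     for i in range(len(train_x)): #anchor
--         for j in range(len(train_x)): #negative
--             if prevent_same_type and i % 4 == j % 4:
--                 continue
--             for k in range(len(train_x)): #positive
--                 if train_y[i] == train_y[j] or train_y[i] != train_y[k]:
--                     continue
--                 if i == k:
--                     continue
--                 sample = []
--                 sample.append(train_x[i])
--                 sample.append(train_x[k])
--                 sample.append(train_x[j])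
--                 triplet.append(sample)
--     return triplet
-- ===== SOURCE B (Python) =====
-- def gen_colocation_triplet(train_x, train_y, prevent_same_type=False):
--     n = len(train_x)
--     # stage 1: hash index of sample indices grouped by class, one pass
--     by_class = {}
--     for k in range(n):
--         by_class.setdefault(train_y[k], []).append(k)
--     # stage 2: negatives computed ONCE PER DISTINCT CLASS, not per anchor
--     neg_map = {c: [(j, train_x[j]) for j in range(n) if train_y[j] != c]
--                for c in by_class}
--     # stage 3: assemble blocks per anchor from the two indexes
--     out = []
--     for i in range(n):
--         yi = train_y[i]
--         xi = train_x[i]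
--         pos = [train_x[k] for k in by_class[yi] if k != i]
--         for (j, xj) in neg_map[yi]:
--             if prevent_same_type and i % 4 == j % 4:
--                 continue
--             for p in pos:
--                 out.append([xi, p, xj])
--     return out
-- ===== Notes on version B (the rewrite author's own statement) =====
-- stated objective: faster
-- what changed: B replaces A's cubic triple loop by staged hash indexes: one pass groups sample indices by class into a dict, a second stage computes the negative (index, x) rows once per distinct class instead of rescanning per (anchor, negative) pair, and a final pass assembles each anchor's block from the two indexes.
-- outside the precondition, e.g. on gen_colocation_triplet([7], [], True): A returns [], B raises IndexError
import Mathlib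
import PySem

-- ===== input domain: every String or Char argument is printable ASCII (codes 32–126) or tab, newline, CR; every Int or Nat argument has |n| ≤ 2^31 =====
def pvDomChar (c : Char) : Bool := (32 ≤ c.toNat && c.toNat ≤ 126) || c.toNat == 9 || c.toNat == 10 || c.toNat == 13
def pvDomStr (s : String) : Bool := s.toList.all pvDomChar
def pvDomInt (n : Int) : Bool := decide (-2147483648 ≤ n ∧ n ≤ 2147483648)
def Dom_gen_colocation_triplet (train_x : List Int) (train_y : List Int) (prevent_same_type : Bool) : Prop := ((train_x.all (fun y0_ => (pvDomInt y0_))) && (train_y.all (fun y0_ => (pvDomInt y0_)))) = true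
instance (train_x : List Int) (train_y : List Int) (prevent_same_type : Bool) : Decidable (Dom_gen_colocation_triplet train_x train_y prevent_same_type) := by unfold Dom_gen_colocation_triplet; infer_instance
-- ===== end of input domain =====

-- B replaces A's cubic triple loop by staged hash indexes: indices grouped by class in one
-- pass, negative rows computed once per distinct class, then blocks assembled per anchor;
-- proved to return the same list on Pre_ (train_x no longer than train_y).


-- ===== PORT A =====
-- train_y[i] etc. is ported as pyGetD; the default 0 is reached only outside Pre_ (where Python raises IndexError).
def gen_colocation_triplet (train_x : List Int) (train_y : List Int) (prevent_same_type : Bool) : List (List Int) :=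
  (PySem.List.pyRange 0 (train_x.length : Int) 1).foldl (fun triplet i =>      -- anchor
    (PySem.List.pyRange 0 (train_x.length : Int) 1).foldl (fun triplet j =>    -- negative
      if prevent_same_type && (PySem.Int.mod i 4 == PySem.Int.mod j 4) then triplet
      else
        (PySem.List.pyRange 0 (train_x.length : Int) 1).foldl (fun triplet k =>  -- positive
          if (PySem.List.pyGetD train_y i 0 == PySem.List.pyGetD train_y j 0)
              || !(PySem.List.pyGetD train_y i 0 == PySem.List.pyGetD train_y k 0) then triplet
          else if i == k then triplet
          else triplet ++ [[PySem.List.pyGetD train_x i 0, PySem.List.pyGetD train_x k 0,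
                            PySem.List.pyGetD train_x j 0]]) triplet) triplet) []

-- ===== PORT B =====
def gen_colocation_triplet_alt (train_x : List Int) (train_y : List Int) (prevent_same_type : Bool) : List (List Int) :=
  let n : Int := (train_x.length : Int)
  -- stage 1: hash index of sample indices grouped by class, one pass (setdefault/append = modify)
  let by_class : PySem.Dict Int (List Int) :=
    (PySem.List.pyRange 0 n 1).foldl
      (fun d k => d.modify (PySem.List.pyGetD train_y k 0) [] (· ++ [k])) PySem.Dict.empty
  -- stage 2: negatives computed once per distinct class (dict comprehension over the keys)
  let neg_map : PySem.Dict Int (List (Int × Int)) :=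
    by_class.keys.foldl
      (fun d c => d.insert c ((PySem.List.pyRange 0 n 1).filterMap (fun j =>
        if !(PySem.List.pyGetD train_y j 0 == c) then some (j, PySem.List.pyGetD train_x j 0)
        else none))) PySem.Dict.empty
  -- stage 3: assemble blocks per anchor from the two indexes
  (PySem.List.pyRange 0 n 1).foldl (fun out i =>
    let yi := PySem.List.pyGetD train_y i 0
    let xi := PySem.List.pyGetD train_x i 0
    let pos := (by_class.getD yi []).filterMap (fun k =>
      if !(k == i) then some (PySem.List.pyGetD train_x k 0) else none)
    (neg_map.getD yi []).foldl (fun out jx =>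
      if prevent_same_type && (PySem.Int.mod i 4 == PySem.Int.mod jx.1 4) then out
      else out ++ pos.map (fun p => [xi, p, jx.2])) out) []

-- ===== PRECONDITION & SPEC =====
-- A indexes train_y at every index of train_x; when train_y is shorter Python raises IndexError
-- (except the degenerate all-skipped prevent_same_type case, where A returns [] but B still
-- indexes train_y while grouping and raises — both excluded, see the cite).
def Pre_gen_colocation_triplet (train_x : List Int) (train_y : List Int) (prevent_same_type : Bool) : Prop :=
  train_x.length ≤ train_y.length
instance (train_x : List Int) (train_y : List Int) (prevent_same_type : Bool) : Decidable (Pre_gen_colocation_triplet train_x train_y prevent_same_type) := by unfold Pre_gen_colocation_triplet; infer_instance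

def pvWitness_gen_colocation_triplet : List Int × List Int × Bool := ([1, 2, 3, 4], [0, 0, 1, 1], false)

def Spec_gen_colocation_triplet (train_x : List Int) (train_y : List Int) (prevent_same_type : Bool) (out : List (List Int)) : Prop := out = gen_colocation_triplet_alt train_x train_y prevent_same_type
instance (train_x : List Int) (train_y : List Int) (prevent_same_type : Bool) (out : List (List Int)) : Decidable (Spec_gen_colocation_triplet train_x train_y prevent_same_type out) := by unfold Spec_gen_colocation_triplet; infer_instance

-- ===== CLAIM (what is proved, stated in full; the proofs are below) =====
def Claim_equal_gen_colocation_triplet : Prop := ∀ (train_x : List Int) (train_y : List Int) (prevent_same_type : Bool), Dom_gen_colocation_triplet train_x train_y prevent_same_type → Pre_gen_colocation_triplet train_x train_y prevent_same_type → Spec_gen_colocation_triplet train_x train_y prevent_same_type (gen_colocation_triplet train_x train_y prevent_same_type)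

-- ===== LEMMAS AND PROOFS =====

-- A foldl whose body is 'acc ++ g x' in disguise accumulates a flatMap.
theorem pv_foldl_body_append {α β : Type} (f : List β → α → List β) (g : α → List β)
    (h : ∀ t x, f t x = t ++ g x) (L : List α) (acc : List β) :
    L.foldl f acc = acc ++ L.flatMap g := by
  have hf : f = fun t x => t ++ g x := funext fun t => funext fun x => h t x
  rw [hf, PySem.List.foldl_append_eq_flatMap]

-- flatMap over a filterMap collapses to a single flatMap.
theorem pv_flatMap_filterMap {α β γ : Type} (f : α → Option β) (g : β → List γ) (L : List α) :
    (L.filterMap f).flatMap g = L.flatMap (fun x => ((f x).map g).getD []) := by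
  induction L with
  | nil => simp
  | cons a L ih => cases h : f a <;> simp [h, ih]

-- a fold-insert dict over a key list, with a value depending only on the key
theorem pv_getD_foldl_insert_fn {κ ν : Type} [BEq κ] [LawfulBEq κ]
    (ks : List κ) (F : κ → ν) (d : PySem.Dict κ ν) (c : κ) (d0 : ν) :
    (ks.foldl (fun d k => d.insert k (F k)) d).getD c d0
      = if c ∈ ks then F c else d.getD c d0 := by
  induction ks generalizing d with
  | nil => simp
  | cons a t ih =>
    simp only [List.foldl_cons, ih, List.mem_cons]
    by_cases hct : c ∈ t
    · simp [hct]
    · by_cases hca : c = a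
      · simp [hca, PySem.Dict.getD_insert_self]
      · simp [hca, hct, PySem.Dict.getD_insert_of_ne _ _ _ hca]

theorem pv_map_filterMap_if {α β γ : Type} (c : α → Bool) (f : α → β) (g : β → γ) (L : List α) :
    (L.filterMap fun k => if c k then some (f k) else none).map g
      = L.flatMap (fun k => if c k then [g (f k)] else []) := by
  induction L with
  | nil => simp
  | cons a L ih => by_cases h : c a <;> simp [h, ih]

-- filterMap after a filter merges into one filterMap
theorem pv_filterMap_filter {α β : Type} (q c : α → Bool) (f : α → β) (L : List α) :
    (L.filter q).filterMap (fun k => if c k then some (f k) else none)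
      = L.filterMap (fun k => if q k && c k then some (f k) else none) := by
  induction L with
  | nil => simp
  | cons a L ih => by_cases h1 : q a <;> by_cases h2 : c a <;> simp [h1, h2, ih]

-- stage 1 characterised: the grouping dict maps a class to the indices of that class, in order
theorem pv_by_class_getD (R : List Int) (y : Int → Int) (c : Int) :
    (R.foldl (fun d k => d.modify (y k) [] (· ++ [k])) PySem.Dict.empty).getD c []
      = R.filter (fun k => y k == c) := by
  have h1 : R.foldl (fun d k => d.modify (y k) [] (· ++ [k])) PySem.Dict.empty
      = (R.map (fun k => (y k, k))).foldl
          (fun (d : PySem.Dict Int (List Int)) p => d.modify p.1 [] (· ++ [p.2])) PySem.Dict.empty := by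
    rw [List.foldl_map]
  rw [h1, PySem.Dict.getD_foldl_modify_append]
  simp [List.filter_map, List.map_map, Function.comp_def]

theorem pv_port_eq (tx ty : List Int) (p : Bool) :
    gen_colocation_triplet tx ty p = gen_colocation_triplet_alt tx ty p := by
  unfold gen_colocation_triplet gen_colocation_triplet_alt
  set R := PySem.List.pyRange 0 (tx.length : Int) 1 with hR
  set yk : Int → Int := fun i => PySem.List.pyGetD ty i 0 with hyk
  set xk : Int → Int := fun i => PySem.List.pyGetD tx i 0 with hxk
  -- name B's two staged indexes
  set by_class : PySem.Dict Int (List Int) :=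
    R.foldl (fun d k => d.modify (yk k) [] (· ++ [k])) PySem.Dict.empty with hbc
  set neg_map : PySem.Dict Int (List (Int × Int)) :=
    by_class.keys.foldl (fun d c => d.insert c (R.filterMap (fun j =>
      if !(yk j == c) then some (j, xk j) else none))) PySem.Dict.empty with hnm
  -- A as a nested flatMap
  have hA : ∀ (t : List (List Int)),
      R.foldl (fun triplet i => R.foldl (fun triplet j =>
        if p && (PySem.Int.mod i 4 == PySem.Int.mod j 4) then triplet
        else R.foldl (fun triplet k =>
          if (yk i == yk j) || !(yk i == yk k) then triplet
          else if i == k then triplet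
          else triplet ++ [[xk i, xk k, xk j]]) triplet) triplet) t
      = t ++ R.flatMap (fun i => R.flatMap (fun j =>
          if p && (PySem.Int.mod i 4 == PySem.Int.mod j 4) then []
          else R.flatMap (fun k =>
            if (yk i == yk j) || !(yk i == yk k) then []
            else if i == k then []
            else [[xk i, xk k, xk j]]))) := by
    intro t
    refine pv_foldl_body_append _ _ (fun t i => ?_) R t
    refine pv_foldl_body_append _ _ (fun t j => ?_) R t
    by_cases hp : (p && (PySem.Int.mod i 4 == PySem.Int.mod j 4)) = true
    · rw [if_pos hp, if_pos hp, List.append_nil]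
    · rw [if_neg hp, if_neg hp]
      refine pv_foldl_body_append _ _ (fun t k => ?_) R t
      by_cases h1 : ((yk i == yk j) || !(yk i == yk k)) = true
      · rw [if_pos h1, if_pos h1, List.append_nil]
      · rw [if_neg h1, if_neg h1]
        by_cases h2 : (i == k) = true
        · rw [if_pos h2, if_pos h2, List.append_nil]
        · rw [if_neg h2, if_neg h2]
  -- B as a flatMap over anchors
  have hB : ∀ (t : List (List Int)),
      R.foldl (fun out i =>
        (neg_map.getD (yk i) []).foldl (fun out jx =>
          if p && (PySem.Int.mod i 4 == PySem.Int.mod jx.1 4) then out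
          else out ++ ((by_class.getD (yk i) []).filterMap (fun k =>
            if !(k == i) then some (xk k) else none)).map (fun q => [xk i, q, jx.2])) out) t
      = t ++ R.flatMap (fun i => (neg_map.getD (yk i) []).flatMap (fun jx =>
          if p && (PySem.Int.mod i 4 == PySem.Int.mod jx.1 4) then []
          else ((by_class.getD (yk i) []).filterMap (fun k =>
            if !(k == i) then some (xk k) else none)).map (fun q => [xk i, q, jx.2]))) := by
    intro t
    refine pv_foldl_body_append _ _ (fun t i => ?_) R t
    refine pv_foldl_body_append _ _ (fun t jx => ?_) _ t
    by_cases hp : (p && (PySem.Int.mod i 4 == PySem.Int.mod jx.1 4)) = true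
    · rw [if_pos hp, if_pos hp, List.append_nil]
    · rw [if_neg hp, if_neg hp]
  rw [hA [], hB []]
  simp only [List.nil_append]
  -- every class of an in-range index is a key of by_class, so stage-2 lookup is the fresh list
  have hneg : ∀ i ∈ R, neg_map.getD (yk i) []
      = R.filterMap (fun j => if !(yk j == yk i) then some (j, xk j) else none) := by
    intro i hi
    have hm : yk i ∈ by_class.keys := by
      rw [hbc, PySem.Dict.keys_foldl_modify_key R yk, PySem.Dict.keys_empty]
      exact (PySem.Set.mem_update _ _ _).mpr (Or.inr (List.mem_map_of_mem hi))
    rw [hnm, pv_getD_foldl_insert_fn, if_pos hm]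
  refine List.flatMap_congr (fun i hi => ?_)
  rw [hneg i hi, pv_flatMap_filterMap]
  refine List.flatMap_congr (fun j _ => ?_)
  by_cases hy : (yk j == yk i) = true
  · -- anchor and negative share a class: both sides contribute nothing
    have hyy : (yk i == yk j) = true := beq_iff_eq.mpr (eq_of_beq hy).symm
    have hz : (fun k => if (yk i == yk j) || !(yk i == yk k) then ([] : List (List Int))
        else if i == k then [] else [[xk i, xk k, xk j]]) = fun _ => [] := by
      funext k; rw [hyy, Bool.true_or]; exact if_pos rfl
    rw [hz]; simp [hy]
  · have hyb : (yk j == yk i) = false := Bool.not_eq_true _ ▸ hy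
    rw [hyb, Bool.not_false, if_pos rfl, Option.map_some, Option.getD_some]
    by_cases hp : (p && (PySem.Int.mod i 4 == PySem.Int.mod j 4)) = true
    · rw [if_pos hp, if_pos hp]
    · rw [if_neg hp, if_neg hp, hbc, pv_by_class_getD R yk (yk i),
        pv_filterMap_filter (fun k => yk k == yk i) (fun k => !(k == i)) xk R,
        pv_map_filterMap_if (fun k => (yk k == yk i) && !(k == i)) xk
          (fun q => [xk i, q, xk j]) R]
      refine List.flatMap_congr (fun k _ => ?_)
      have hyp : ¬ (yk i = yk j) := by
        intro e; exact hy (beq_iff_eq.mpr e.symm)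
      by_cases h1 : yk i = yk k
      · by_cases h2 : i = k
        · subst h2; simp [hyp]
        · have hyp2 : ¬ yk k = yk j := h1 ▸ hyp
          simp [h1, hyp2, h2, Ne.symm h2]
      · have h1' : ¬ yk k = yk i := fun e => h1 e.symm
        simp [hyp, h1, h1']

-- ===== VERDICT (by name: the statement is the Claim_ definition above) =====
theorem gen_colocation_triplet_spec : Claim_equal_gen_colocation_triplet := by
  intro tx ty p _ _
  unfold Spec_gen_colocation_triplet
  exact pv_port_eq tx ty p
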